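-- pv_equiv track=rewrite | github.com/francico4293/Sudoku-Solver---Back-Propagation-Algorithm | app.py | update_sub_box_dict
-- ===== SOURCE A (Python) =====
-- def update_sub_box_dict(row, column, sub_box):
--     conversion_dict = {1: {1: [[1, 1], [2, 2], [3, 3]],
--                            2: [[1, 4], [2, 5], [3, 6]],
--                            3: [[1, 7], [2, 8], [3, 9]]},
--                        2: {1: [[4, 1], [5, 2], [6, 3]],
--                            2: [[4, 4], [5, 5], [6, 6]],
--                            3: [[4, 7], [5, 8], [6, 9]]},
--                        3: {1: [[7, 1], [8, 2], [9, 3]],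
--                            2: [[7, 4], [8, 5], [9, 6]],
--                            3: [[7, 7], [8, 8], [9, 9]]},
--                        4: {4: [[1, 1], [2, 2], [3, 3]],
--                            5: [[1, 4], [2, 5], [3, 6]],
--                            6: [[1, 7], [2, 8], [3, 9]]},
--                        5: {4: [[4, 1], [5, 2], [6, 3]],
--                            5: [[4, 4], [5, 5], [6, 6]],
--                            6: [[4, 7], [5, 8], [6, 9]]},
--                        6: {4: [[7, 1], [8, 2], [9, 3]],
--                            5: [[7, 4], [8, 5], [9, 6]],
--                            6: [[7, 7], [8, 8], [9, 9]]},
--                        7: {7: [[1, 1], [2, 2], [3, 3]],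
--                            8: [[1, 4], [2, 5], [3, 6]],
--                            9: [[1, 7], [2, 8], [3, 9]]},
--                        8: {7: [[4, 1], [5, 2], [6, 3]],
--                            8: [[4, 4], [5, 5], [6, 6]],
--                            9: [[4, 7], [5, 8], [6, 9]]},
--                        9: {7: [[7, 1], [8, 2], [9, 3]],
--                            8: [[7, 4], [8, 5], [9, 6]],
--                            9: [[7, 7], [8, 8], [9, 9]]}}
--
--     for key in conversion_dict[sub_box]:
--         if row == key:
--             for conversion in conversion_dict[sub_box][key]:
--                 if column == conversion[0]:
--                     return conversion[1] - 1
-- ===== SOURCE B (Python) =====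
-- def update_sub_box_dict(row, column, sub_box):
--     # Each sub-box s (1..9) covers a band of 3 rows and 3 columns; compute the
--     # within-box linear index directly instead of scanning an 81-entry table.
--     layout = {s: (tuple(range(3 * ((s - 1) // 3) + 1, 3 * ((s - 1) // 3) + 4)),
--                   tuple(range(3 * ((s - 1) % 3) + 1, 3 * ((s - 1) % 3) + 4)))
--               for s in range(1, 10)}
--     rows, cols = layout[sub_box]
--     if row in rows and column in cols:
--         return 3 * rows.index(row) + cols.index(column)
--     return None
-- ===== Notes on version B (the rewrite author's own statement) =====
-- stated objective: simpler
-- what changed: Replaced the 81-entry nested conversion dict and its two linear scans by a 9-entry band layout (valid rows, valid columns per sub-box) and a direct arithmetic index 3*rows.index(row)+cols.index(column).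
-- outside the precondition, e.g. on update_sub_box_dict(1, 1, 0): A raises KeyError, B raises KeyError
import Mathlib
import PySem

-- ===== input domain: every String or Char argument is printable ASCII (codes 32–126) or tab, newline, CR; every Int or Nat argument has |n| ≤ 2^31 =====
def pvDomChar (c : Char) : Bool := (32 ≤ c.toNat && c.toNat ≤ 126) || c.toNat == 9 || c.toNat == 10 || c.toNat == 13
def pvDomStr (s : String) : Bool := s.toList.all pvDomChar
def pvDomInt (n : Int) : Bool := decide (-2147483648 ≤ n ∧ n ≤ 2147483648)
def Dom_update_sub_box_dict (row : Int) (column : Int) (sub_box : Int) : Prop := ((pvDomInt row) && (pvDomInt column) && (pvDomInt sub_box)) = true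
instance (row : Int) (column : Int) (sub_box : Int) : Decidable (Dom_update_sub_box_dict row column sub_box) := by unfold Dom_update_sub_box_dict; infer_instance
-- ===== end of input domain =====

-- B replaces A's 81-entry nested lookup table by a 9-entry band layout and computes
-- the within-box index arithmetically from the row/column positions in the band (simpler).


-- ===== PORT A =====
-- A's literal nested dict: sub_box ↦ (row key ↦ list of [column, value] pairs)
def pvConversionTable : List (Int × List (Int × List (Int × Int))) :=
  [
    (1, [(1, [(1, 1), (2, 2), (3, 3)]), (2, [(1, 4), (2, 5), (3, 6)]), (3, [(1, 7), (2, 8), (3, 9)])]),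
    (2, [(1, [(4, 1), (5, 2), (6, 3)]), (2, [(4, 4), (5, 5), (6, 6)]), (3, [(4, 7), (5, 8), (6, 9)])]),
    (3, [(1, [(7, 1), (8, 2), (9, 3)]), (2, [(7, 4), (8, 5), (9, 6)]), (3, [(7, 7), (8, 8), (9, 9)])]),
    (4, [(4, [(1, 1), (2, 2), (3, 3)]), (5, [(1, 4), (2, 5), (3, 6)]), (6, [(1, 7), (2, 8), (3, 9)])]),
    (5, [(4, [(4, 1), (5, 2), (6, 3)]), (5, [(4, 4), (5, 5), (6, 6)]), (6, [(4, 7), (5, 8), (6, 9)])]),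
    (6, [(4, [(7, 1), (8, 2), (9, 3)]), (5, [(7, 4), (8, 5), (9, 6)]), (6, [(7, 7), (8, 8), (9, 9)])]),
    (7, [(7, [(1, 1), (2, 2), (3, 3)]), (8, [(1, 4), (2, 5), (3, 6)]), (9, [(1, 7), (2, 8), (3, 9)])]),
    (8, [(7, [(4, 1), (5, 2), (6, 3)]), (8, [(4, 4), (5, 5), (6, 6)]), (9, [(4, 7), (5, 8), (6, 9)])]),
    (9, [(7, [(7, 1), (8, 2), (9, 3)]), (8, [(7, 4), (8, 5), (9, 6)]), (9, [(7, 7), (8, 8), (9, 9)])])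
  ]

-- inner 'for conversion in …: if column == conversion[0]: return conversion[1] - 1'
def pvScanInner (column : Int) : List (Int × Int) → Option Int
  | [] => none
  | (c, v) :: rest => if column = c then some (v - 1) else pvScanInner column rest

-- outer 'for key in conversion_dict[sub_box]: if row == key: …' (falls through on no column match)
def pvScanOuter (row column : Int) : List (Int × List (Int × Int)) → Option Int
  | [] => none
  | (k, convs) :: rest =>
    if row = k then
      match pvScanInner column convs with
      | some r => some r
      | none => pvScanOuter row column rest
    else pvScanOuter row column rest

-- 'conversion_dict[sub_box]' raises KeyError when absent; Pre_ excludes that, the port returns none there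
def update_sub_box_dict (row : Int) (column : Int) (sub_box : Int) : Option Int :=
  match pvConversionTable.lookup sub_box with
  | none => none
  | some inner => pvScanOuter row column inner

-- ===== PORT B =====
-- layout comprehension: sub_box ↦ (its 3 valid rows, its 3 valid columns)
def pvLayout : List (Int × (List Int × List Int)) :=
  (PySem.List.pyRange 1 10 1).map (fun s =>
    (s, (PySem.List.pyRange (3 * (PySem.Int.floordiv (s - 1) 3) + 1) (3 * (PySem.Int.floordiv (s - 1) 3) + 4) 1,
         PySem.List.pyRange (3 * (PySem.Int.mod (s - 1) 3) + 1) (3 * (PySem.Int.mod (s - 1) 3) + 4) 1)))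

def update_sub_box_dict_alt (row : Int) (column : Int) (sub_box : Int) : Option Int :=
  match pvLayout.lookup sub_box with
  | none => none  -- Python raises KeyError here; excluded by Pre_
  | some (rows, cols) =>
    if rows.contains row && cols.contains column then
      match PySem.List.index? rows row, PySem.List.index? cols column with
      | some i, some j => some (3 * (i : Int) + (j : Int))
      | _, _ => none
    else none

-- ===== PRECONDITION & SPEC =====
-- Pre_ excludes exactly the sub_box values outside 1..9, on which A raises KeyError.
def Pre_update_sub_box_dict (row : Int) (column : Int) (sub_box : Int) : Prop :=
  1 ≤ sub_box ∧ sub_box ≤ 9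
instance (row : Int) (column : Int) (sub_box : Int) : Decidable (Pre_update_sub_box_dict row column sub_box) := by unfold Pre_update_sub_box_dict; infer_instance

def pvWitness_update_sub_box_dict : Int × Int × Int := (5, 4, 5)

def Spec_update_sub_box_dict (row : Int) (column : Int) (sub_box : Int) (out : Option Int) : Prop := out = update_sub_box_dict_alt row column sub_box
instance (row : Int) (column : Int) (sub_box : Int) (out : Option Int) : Decidable (Spec_update_sub_box_dict row column sub_box out) := by unfold Spec_update_sub_box_dict; infer_instance

-- ===== CLAIM (what is proved, stated in full; the proofs are below) =====
def Claim_equal_update_sub_box_dict : Prop := ∀ (row : Int) (column : Int) (sub_box : Int), Dom_update_sub_box_dict row column sub_box → Pre_update_sub_box_dict row column sub_box → Spec_update_sub_box_dict row column sub_box (update_sub_box_dict row column sub_box)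

-- ===== LEMMAS AND PROOFS =====

-- A's table entry for the band starting at (r0, c0)
def pvMkTable (r0 c0 : Int) : List (Int × List (Int × Int)) :=
  [(r0 + 1, [(c0 + 1, 1), (c0 + 2, 2), (c0 + 3, 3)]),
   (r0 + 2, [(c0 + 1, 4), (c0 + 2, 5), (c0 + 3, 6)]),
   (r0 + 3, [(c0 + 1, 7), (c0 + 2, 8), (c0 + 3, 9)])]

-- B's band computation on the explicit 3-row/3-column band
def pvBandAlt (row column r0 c0 : Int) : Option Int :=
  if [r0 + 1, r0 + 2, r0 + 3].contains row && [c0 + 1, c0 + 2, c0 + 3].contains column then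
    match PySem.List.index? [r0 + 1, r0 + 2, r0 + 3] row, PySem.List.index? [c0 + 1, c0 + 2, c0 + 3] column with
    | some i, some j => some (3 * (i : Int) + (j : Int))
    | _, _ => none
  else none

-- idxOf? on the explicit 3-element band, evaluated at each of its members
theorem pv_idxA1 (a : Int) : List.idxOf? (a + 1) [a + 1, a + 2, a + 3] = some 0 := by
  simp [List.idxOf?_cons]
theorem pv_idxA2 (a : Int) : List.idxOf? (a + 2) [a + 1, a + 2, a + 3] = some 1 := by
  simp [List.idxOf?_cons, show a + 1 ≠ a + 2 by omega]
theorem pv_idxA3 (a : Int) : List.idxOf? (a + 3) [a + 1, a + 2, a + 3] = some 2 := by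
  simp [List.idxOf?_cons, show a + 1 ≠ a + 3 by omega, show a + 2 ≠ a + 3 by omega]

theorem pv_band_key (row column r0 c0 : Int) :
    pvScanOuter row column (pvMkTable r0 c0) = pvBandAlt row column r0 c0 := by
  by_cases h1 : row = r0 + 1 <;> by_cases h2 : row = r0 + 2 <;> by_cases h3 : row = r0 + 3 <;>
  by_cases g1 : column = c0 + 1 <;> by_cases g2 : column = c0 + 2 <;> by_cases g3 : column = c0 + 3 <;>
  simp_all [pvScanOuter, pvScanInner, pvMkTable, pvBandAlt, PySem.List.index?,
    pv_idxA1, pv_idxA2, pv_idxA3]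

theorem pv_case (row column sub_box r0 c0 : Int)
    (hA : pvConversionTable.lookup sub_box = some (pvMkTable r0 c0))
    (hB : pvLayout.lookup sub_box = some ([r0 + 1, r0 + 2, r0 + 3], [c0 + 1, c0 + 2, c0 + 3])) :
    update_sub_box_dict row column sub_box = update_sub_box_dict_alt row column sub_box := by
  simp only [update_sub_box_dict, update_sub_box_dict_alt, hA, hB]
  exact pv_band_key row column r0 c0

-- ===== VERDICT (by name: the statement is the Claim_ definition above) =====
theorem update_sub_box_dict_spec : Claim_equal_update_sub_box_dict := by
  intro row column sub_box _ hpre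
  unfold Spec_update_sub_box_dict
  obtain ⟨h1, h2⟩ := hpre
  interval_cases sub_box
  · exact pv_case row column 1 0 0 (by decide) (by decide)
  · exact pv_case row column 2 0 3 (by decide) (by decide)
  · exact pv_case row column 3 0 6 (by decide) (by decide)
  · exact pv_case row column 4 3 0 (by decide) (by decide)
  · exact pv_case row column 5 3 3 (by decide) (by decide)
  · exact pv_case row column 6 3 6 (by decide) (by decide)
  · exact pv_case row column 7 6 0 (by decide) (by decide)
  · exact pv_case row column 8 6 3 (by decide) (by decide)
  · exact pv_case row column 9 6 6 (by decide) (by decide)
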